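-- pv_equiv track=rewrite | github.com/Fpg13/Project-MTLS | MTLSProject/Scripts/predictionmodules.py | getinputtesting
-- ===== SOURCE A (Python) =====
-- import itertools
-- import collections
--
-- def getinputtesting(dictionary2,slidingsize):
--
--     flankingaa=[0,0,0,0,0,0,0,0,0,0,0,0,0,0,0,0,0,0,0,0]
--     amountflanking=slidingsize//2
--     aatoadd=[]
--
--     for i in range(amountflanking):
--         aatoadd=aatoadd+[flankingaa]
--
--     modifieddictionary2=collections.OrderedDict()
--
--     for proteins in dictionary2.keys():
--         modifieddictionary2[proteins]=aatoadd+dictionary2[proteins]+aatoadd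
--
--     testsetaa=[] #testing input
--
--     for proteins in modifieddictionary2.keys():
--         sequence=modifieddictionary2.get(proteins)
--         for i in range(len(sequence)-2*amountflanking):
--             tosave=sequence[i:(i+slidingsize)]
--             merged2 = list(itertools.chain(*tosave))
--             testsetaa.append(merged2)
--
--     return(testsetaa)
-- ===== SOURCE B (Python) =====
-- def getinputtesting(dictionary2, slidingsize):
--     amountflanking = slidingsize // 2
--     pad = [[0] * 20] * amountflanking
--     rows = []
--     for seq in dictionary2.values():
--         padded = pad + list(seq) + pad
--         off = [0]
--         for e in padded:
--             off.append(off[-1] + len(e))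
--         flat = [x for e in padded for x in e]
--         for i in range(len(seq)):
--             rows.append(flat[off[i]:off[min(i + slidingsize, len(padded))]])
--     return rows
-- ===== Notes on version B (the rewrite author's own statement) =====
-- stated objective: alternative
-- what changed: Instead of materializing each window and flattening it with itertools.chain per output row, B flattens each padded sequence once and computes a prefix-sum offset table of element lengths, emitting every row as a single slice flat[off[i]:off[min(i+slidingsize, len(padded))]] of the flat list.
-- outside the precondition, e.g. on getinputtesting({'p': [[1], [2], [3]]}, -1): A returns [[1, 2], [], [], [], []], B returns [[1, 2, 3], [], []]
import Mathlib
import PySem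

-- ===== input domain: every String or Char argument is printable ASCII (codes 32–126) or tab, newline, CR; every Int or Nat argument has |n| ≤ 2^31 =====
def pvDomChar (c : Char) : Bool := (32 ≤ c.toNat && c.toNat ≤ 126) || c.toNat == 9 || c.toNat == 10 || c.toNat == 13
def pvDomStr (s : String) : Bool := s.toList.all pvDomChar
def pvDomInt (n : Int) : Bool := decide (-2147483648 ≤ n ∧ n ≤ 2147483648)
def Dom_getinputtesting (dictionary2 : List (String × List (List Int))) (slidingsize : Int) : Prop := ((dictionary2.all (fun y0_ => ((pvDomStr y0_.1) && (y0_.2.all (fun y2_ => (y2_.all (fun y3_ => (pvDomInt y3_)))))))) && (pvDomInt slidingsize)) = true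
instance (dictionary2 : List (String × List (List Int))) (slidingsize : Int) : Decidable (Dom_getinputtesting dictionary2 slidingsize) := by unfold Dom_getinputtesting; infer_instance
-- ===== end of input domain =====

-- B replaces the per-window itertools.chain flattening by one flatten per protein plus
-- a prefix-sum offset table, each output row being a single slice of the flat list.
-- Claimed for nonnegative slidingsize (the natural domain, see Pre_ below).

-- ===== PORT A =====
def getinputtesting (dictionary2 : List (String × List (List Int))) (slidingsize : Int) : List (List Int) :=
  let flankingaa : List Int := [0,0,0,0,0,0,0,0,0,0,0,0,0,0,0,0,0,0,0,0]
  let amountflanking := PySem.Int.floordiv slidingsize 2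
  let aatoadd := (PySem.List.pyRange 0 amountflanking 1).foldl
    (fun acc _ => acc ++ [flankingaa]) ([] : List (List Int))
  let d := PySem.Dict.ofList dictionary2
  -- dictionary2[proteins]: the key comes from d.keys, so it is present; getD [] is exact here
  let modifieddictionary2 := (PySem.Dict.keys d).foldl
    (fun m proteins => m.insert proteins (aatoadd ++ PySem.Dict.getD d proteins [] ++ aatoadd))
    (PySem.Dict.empty : PySem.Dict String (List (List Int)))
  -- modifieddictionary2.get(proteins): the key is present, so getD [] is exact here
  (PySem.Dict.keys modifieddictionary2).foldl (fun testsetaa proteins =>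
    let sequence := PySem.Dict.getD modifieddictionary2 proteins []
    (PySem.List.pyRange 0 ((sequence.length : Int) - 2 * amountflanking) 1).foldl
      (fun acc i => acc ++ [(PySem.List.slice sequence (some i) (some (i + slidingsize))).flatten])
      testsetaa) []

-- ===== PORT B =====
-- helper _offsets of Source B: off = [0]; for e in padded: off.append(off[-1] + len(e))
def pvOffsets (padded : List (List Int)) : List Int :=
  padded.foldl (fun off e => off ++ [PySem.List.pyGetD off (-1) 0 + (e.length : Int)]) [(0 : Int)]

-- helper _flat of Source B: [x for e in padded for x in e]
def pvFlat (padded : List (List Int)) : List Int := padded.flatMap (fun e => e)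

def getinputtesting_alt (dictionary2 : List (String × List (List Int))) (slidingsize : Int) : List (List Int) :=
  let amountflanking := PySem.Int.floordiv slidingsize 2
  let pad := PySem.List.pyRepeat [PySem.List.pyRepeat [(0 : Int)] 20] amountflanking
  (PySem.Dict.values (PySem.Dict.ofList dictionary2)).foldl (fun rows seq =>
    let padded := pad ++ seq ++ pad
    let off := pvOffsets padded
    let flat := pvFlat padded
    (PySem.List.pyRange 0 (seq.length : Int) 1).foldl (fun rows i =>
      rows ++ [PySem.List.slice flat (some (PySem.List.pyGetD off i 0))
        (some (PySem.List.pyGetD off (min (i + slidingsize) ((padded.length : Int))) 0))]) rows) []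

-- ===== PRECONDITION & SPEC =====
-- Pre_ restricts to the natural domain of a nonnegative window size: for slidingsize < 0
-- A pads with nothing yet iterates past the sequence end and slices with Python's
-- negative-stop wraparound, producing accidental windows that B does not reproduce.
def Pre_getinputtesting (dictionary2 : List (String × List (List Int))) (slidingsize : Int) : Prop :=
  0 ≤ slidingsize
instance (dictionary2 : List (String × List (List Int))) (slidingsize : Int) : Decidable (Pre_getinputtesting dictionary2 slidingsize) := by unfold Pre_getinputtesting; infer_instance

def pvWitness_getinputtesting : (List (String × List (List Int))) × Int := ([("p", [[1, 2], [3]])], 3)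

def Spec_getinputtesting (dictionary2 : List (String × List (List Int))) (slidingsize : Int) (out : List (List Int)) : Prop := out = getinputtesting_alt dictionary2 slidingsize
instance (dictionary2 : List (String × List (List Int))) (slidingsize : Int) (out : List (List Int)) : Decidable (Spec_getinputtesting dictionary2 slidingsize out) := by unfold Spec_getinputtesting; infer_instance

-- ===== CLAIM (what is proved, stated in full; the proofs are below) =====
def Claim_equal_getinputtesting : Prop := ∀ (dictionary2 : List (String × List (List Int))) (slidingsize : Int), Dom_getinputtesting dictionary2 slidingsize → Pre_getinputtesting dictionary2 slidingsize → Spec_getinputtesting dictionary2 slidingsize (getinputtesting dictionary2 slidingsize)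

-- ===== LEMMAS AND PROOFS =====

-- cumulative length of the first k element-vectors of s
def pvOffN (s : List (List Int)) (k : Nat) : Nat := ((s.take k).map List.length).sum

theorem pv_flatten_take (s : List (List Int)) (k : Nat) :
    (s.take k).flatten = s.flatten.take (pvOffN s k) := by
  induction s generalizing k with
  | nil => simp [pvOffN]
  | cons h t ih => cases k with
    | zero => simp [pvOffN]
    | succ k => simp [pvOffN, ih, List.take_append]

theorem pv_flatten_drop (s : List (List Int)) (k : Nat) :
    (s.drop k).flatten = s.flatten.drop (pvOffN s k) := by
  induction s generalizing k with
  | nil => simp [pvOffN]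
  | cons h t ih => cases k with
    | zero => simp [pvOffN]
    | succ k => simp [pvOffN, ih, List.drop_append]

theorem pvOffN_take (s : List (List Int)) (a m : Nat) (h : a ≤ m) :
    pvOffN (s.take m) a = pvOffN s a := by
  simp [pvOffN, List.take_take, Nat.min_eq_left h]

theorem pvOffN_append_of_le (l : List (List Int)) (e : List Int) (k : Nat) (h : k ≤ l.length) :
    pvOffN (l ++ [e]) k = pvOffN l k := by
  simp [pvOffN, List.take_append_of_le_length h]

-- the offsets list B builds is the table of cumulative lengths
theorem pvOffsets_eq (s : List (List Int)) :
    pvOffsets s = (List.range (s.length + 1)).map (fun k => (pvOffN s k : Int)) := by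
  induction s using List.reverseRecOn with
  | nil => simp [pvOffsets, pvOffN]
  | append_singleton l e ih =>
    unfold pvOffsets at ih ⊢
    rw [List.foldl_append, ih]
    rw [List.length_append, List.length_singleton,
      show l.length + 1 + 1 = (l.length + 1) + 1 from rfl, List.range_succ (n := l.length + 1)]
    conv_lhs => rw [List.range_succ]
    simp only [List.foldl_cons, List.foldl_nil, List.map_append, List.map_cons, List.map_nil,
      PySem.List.pyGetD_neg_one_append_singleton]
    congr 1
    · rw [List.range_succ, List.map_append, List.map_cons, List.map_nil]
      congr 1
      · apply List.map_congr_left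
        intro k hk
        rw [List.mem_range] at hk
        rw [pvOffN_append_of_le l e k (by omega)]
      · rw [pvOffN_append_of_le l e l.length le_rfl]
    · have h1 : pvOffN (l ++ [e]) (l.length + 1) = pvOffN l l.length + e.length := by
        simp [pvOffN, List.take_of_length_le (by simp : (l ++ [e]).length ≤ l.length + 1)]
      simp [h1]

-- one window: the flattening of an element-slice is an offset-slice of the flattening
theorem pv_window_eq (s : List (List Int)) (i ss : Int) (h0 : 0 ≤ i) (hss : 0 ≤ ss)
    (hi : i ≤ (s.length : Int)) :
    (PySem.List.slice s (some i) (some (i + ss))).flatten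
      = PySem.List.slice s.flatten (some ((pvOffN s i.toNat : Nat) : Int))
          (some ((pvOffN s (min (i.toNat + ss.toNat) s.length) : Nat) : Int)) := by
  rw [PySem.List.slice_toNat s h0 (by omega), PySem.List.slice_natCast]
  have ht : (i + ss).toNat - i.toNat = ss.toNat := by omega
  rw [ht]
  set a := i.toNat with ha
  set t := ss.toNat with hta
  set m := min (a + t) s.length with hm
  have ham : a ≤ m := by omega
  have h2 : (s.drop a).take t = (s.take m).drop a := by
    rw [List.drop_take, List.take_eq_take_min, List.length_drop]
    congr 1
    omega
  rw [h2, pv_flatten_drop (s.take m) a, pv_flatten_take s m, pvOffN_take s a m ham,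
    List.drop_take]

-- per-protein loop: A's chained windows equal B's offset-sliced windows
theorem pv_inner_eq (ss : Int) (hss : 0 ≤ ss) (pad v : List (List Int)) (acc : List (List Int))
    (hpad : (pad.length : Int) = PySem.Int.floordiv ss 2) :
    (PySem.List.pyRange 0 (((pad ++ v ++ pad).length : Int) - 2 * PySem.Int.floordiv ss 2) 1).foldl
      (fun a i => a ++ [(PySem.List.slice (pad ++ v ++ pad) (some i) (some (i + ss))).flatten]) acc
    = (PySem.List.pyRange 0 (v.length : Int) 1).foldl (fun a i =>
        a ++ [PySem.List.slice (pvFlat (pad ++ v ++ pad)) (some (PySem.List.pyGetD (pvOffsets (pad ++ v ++ pad)) i 0))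
          (some (PySem.List.pyGetD (pvOffsets (pad ++ v ++ pad)) (min (i + ss) (((pad ++ v ++ pad).length : Int))) 0))]) acc := by
  have hb : (((pad ++ v ++ pad).length : Int) - 2 * PySem.Int.floordiv ss 2) = (v.length : Int) := by
    rw [← hpad]; simp [List.length_append]; ring
  rw [hb, PySem.List.foldl_append_singleton_eq_map, PySem.List.foldl_append_singleton_eq_map]
  congr 1
  apply List.map_congr_left
  intro i hmem
  rw [PySem.List.mem_pyRange_one] at hmem
  obtain ⟨h0, hiv⟩ := hmem
  set s := pad ++ v ++ pad with hs
  have hsl : s.length = pad.length + v.length + pad.length := by simp [hs]; omega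
  have hile : i ≤ (s.length : Int) := by rw [hsl]; push_cast; omega
  rw [pv_window_eq s i ss h0 hss hile]
  have hflat : pvFlat s = s.flatten := List.flatMap_id'
  rw [hflat, pvOffsets_eq]
  have hg1 : PySem.List.pyGetD ((List.range (s.length + 1)).map (fun k => (pvOffN s k : Int))) i 0
      = (pvOffN s i.toNat : Int) := by
    rw [← Int.toNat_of_nonneg h0, PySem.List.pyGetD_natCast]
    exact PySem.List.getD_map_range _ _ _ _ (by omega)
  have hmin : min (i + ss) ((s.length : Int)) = ((min (i.toNat + ss.toNat) s.length : Nat) : Int) := by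
    omega
  have hg2 : PySem.List.pyGetD ((List.range (s.length + 1)).map (fun k => (pvOffN s k : Int)))
      (min (i + ss) ((s.length : Int))) 0 = (pvOffN s (min (i.toNat + ss.toNat) s.length) : Int) := by
    rw [hmin, PySem.List.pyGetD_natCast]
    exact PySem.List.getD_map_range _ _ _ _ (by omega)
  rw [hg1, hg2]

theorem pv_main (dictionary2 : List (String × List (List Int))) (slidingsize : Int)
    (hss : 0 ≤ slidingsize) :
    getinputtesting dictionary2 slidingsize = getinputtesting_alt dictionary2 slidingsize := by
  simp only [getinputtesting, getinputtesting_alt]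
  set af := PySem.Int.floordiv slidingsize 2 with haf
  have haf0 : 0 ≤ af := by
    rw [haf, PySem.Int.floordiv_eq_ediv_of_pos (by norm_num)]
    exact Int.ediv_nonneg hss (by norm_num)
  set flank : List Int := [0,0,0,0,0,0,0,0,0,0,0,0,0,0,0,0,0,0,0,0] with hflank
  set pad := PySem.List.pyRepeat [PySem.List.pyRepeat [(0 : Int)] 20] af with hpadDef
  have hpadrep : pad = List.replicate af.toNat flank := by
    rw [hpadDef, PySem.List.pyRepeat_singleton]
    congr 1
  have hpadeq : (PySem.List.pyRange 0 af 1).foldl (fun acc _ => acc ++ [flank]) ([] : List (List Int)) = pad := by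
    rw [PySem.List.foldl_append_singleton_eq_map (f := fun _ => flank), List.nil_append, hpadrep]
    rw [List.map_const', PySem.List.length_pyRange_one]
    congr 1
    omega
  rw [hpadeq]
  set d := PySem.Dict.ofList dictionary2 with hd
  have hnod : d.keys.Nodup := PySem.Dict.nodup_keys_ofList dictionary2
  have hitems : ((PySem.Dict.keys d).foldl
      (fun m proteins => m.insert proteins (pad ++ PySem.Dict.getD d proteins [] ++ pad))
      (PySem.Dict.empty : PySem.Dict String (List (List Int)))).items
      = d.keys.map (fun k => (k, pad ++ PySem.Dict.getD d k [] ++ pad)) := by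
    have h := PySem.Dict.items_foldl_insert_fresh (d.keys) (fun a => a)
      (fun a => pad ++ PySem.Dict.getD d a [] ++ pad)
      (PySem.Dict.empty : PySem.Dict String (List (List Int)))
      (fun a _ => PySem.Dict.contains_empty a) (by simpa using hnod)
    simpa using h
  set modified := (PySem.Dict.keys d).foldl
      (fun m proteins => m.insert proteins (pad ++ PySem.Dict.getD d proteins [] ++ pad))
      (PySem.Dict.empty : PySem.Dict String (List (List Int))) with hmod
  have hkeys : modified.keys = d.keys := by
    simp only [PySem.Dict.keys, hitems, List.map_map]
    simp
  have hknod : modified.keys.Nodup := by rw [hkeys]; exact hnod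
  have hget : ∀ k ∈ d.keys, PySem.Dict.getD modified k [] = pad ++ PySem.Dict.getD d k [] ++ pad := by
    intro k hk
    exact PySem.Dict.getD_of_mem_items modified (by rw [hitems]; exact List.mem_map_of_mem hk) hknod []
  rw [hkeys]
  rw [PySem.List.foldl_congr_mem d.keys _ (fun acc k =>
    (PySem.List.pyRange 0 ((((pad ++ PySem.Dict.getD d k [] ++ pad)).length : Int) - 2 * af) 1).foldl
      (fun acc i => acc ++ [(PySem.List.slice (pad ++ PySem.Dict.getD d k [] ++ pad) (some i) (some (i + slidingsize))).flatten]) acc) []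
    (by intro acc k hk; rw [hget k hk])]
  have hkeysmap : d.keys = d.items.map (·.1) := rfl
  have hvalsmap : PySem.Dict.values d = d.items.map (·.2) := rfl
  rw [hkeysmap, hvalsmap, List.foldl_map, List.foldl_map]
  apply PySem.List.foldl_congr_mem
  intro acc p hp
  have hpv : PySem.Dict.getD d p.1 [] = p.2 :=
    PySem.Dict.getD_of_mem_items d (by rw [← Prod.mk.eta (p := p)] at hp; exact hp) hnod []
  simp only [hpv]
  exact pv_inner_eq slidingsize hss pad p.2 acc
    (by rw [hpadrep]; simp [haf]; omega)

-- ===== VERDICT (by name: the statement is the Claim_ definition above) =====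
theorem getinputtesting_spec : Claim_equal_getinputtesting := by
  intro dictionary2 slidingsize _hdom hpre
  unfold Spec_getinputtesting
  exact pv_main dictionary2 slidingsize hpre
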